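-- pv_equiv track=rewrite | github.com/DorotheeMorand/empathy_videos_analysis_DMG | physio_clean_and_correlate_DMG.py | exclude_invalid
-- ===== SOURCE A (Python) =====
-- def does_overlap(intv1, intv2):
--     (a1, b1) = intv1
--     if a1 > b1: (a1, b1) = (b1, a1)  # if coded inversely, flip
--     (a2, b2) = intv2
--     if a2 > b2: (a2, b2) = (b2, a2)
--     overlapmin = max([a1, a2])
--     overlapmax = min([b1, b2])
--     return overlapmin <= overlapmax
--
-- def exclude_invalid(peak_times, invalid_areas):
--     valid_intervals = []
--     for i in range(len(peak_times) - 1):  # -1 so it does not go out of range (for intervals)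
--         start_time = peak_times[i]  # peak 1
--         end_time = peak_times[i + 1]  # peak 2
--         interval = (start_time, end_time)
--         if not any(does_overlap(interval, invalid_area) for invalid_area in invalid_areas):
--             valid_intervals.append(interval)
--     return valid_intervals
-- ===== SOURCE B (Python) =====
-- from bisect import bisect_right
--
-- def exclude_invalid(peak_times, invalid_areas):
--     # normalize areas, sort by start, precompute prefix-max of ends
--     areas = sorted(((a, b) if a <= b else (b, a) for (a, b) in invalid_areas),
--                    key=lambda p: p[0])
--     starts = [a for (a, _) in areas]
--     prefmax = []
--     best = None
--     for (_, b) in areas: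
--         best = b if best is None or b > best else best
--         prefmax.append(best)
--     out = []
--     for (s, e) in zip(peak_times, peak_times[1:]):
--         (lo, hi) = (s, e) if s <= e else (e, s)
--         k = bisect_right(starts, hi)
--         if k == 0 or prefmax[k - 1] < lo:
--             out.append((s, e))
--     return out
-- ===== Notes on version B (the rewrite author's own statement) =====
-- stated objective: faster
-- what changed: Replaces A's per-interval linear scan over all invalid areas with a one-time sort of the normalized areas plus a prefix-max array of right endpoints, answering each consecutive-peak interval's overlap test by a single bisect_right stabbing query.
import Mathlib
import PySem

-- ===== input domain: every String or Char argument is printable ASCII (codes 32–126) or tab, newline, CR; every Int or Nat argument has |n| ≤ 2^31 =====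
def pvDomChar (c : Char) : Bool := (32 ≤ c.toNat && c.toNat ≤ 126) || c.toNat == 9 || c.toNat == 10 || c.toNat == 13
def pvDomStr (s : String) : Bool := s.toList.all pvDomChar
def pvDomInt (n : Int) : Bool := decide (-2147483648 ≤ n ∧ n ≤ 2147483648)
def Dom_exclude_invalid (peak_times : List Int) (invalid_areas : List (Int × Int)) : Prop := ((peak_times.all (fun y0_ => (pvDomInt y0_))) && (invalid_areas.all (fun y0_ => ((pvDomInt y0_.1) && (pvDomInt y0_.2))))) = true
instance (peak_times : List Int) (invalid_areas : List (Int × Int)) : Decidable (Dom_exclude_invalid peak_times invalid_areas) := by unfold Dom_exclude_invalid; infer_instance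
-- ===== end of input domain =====

-- B replaces A's per-interval scan of all invalid areas (O(n*m)) by sorting the normalized
-- areas once, prefix-max of their right endpoints, and a binary-search stabbing query per
-- consecutive-peak interval (objective: faster).

-- ===== PORT A =====
def does_overlap (intv1 intv2 : Int × Int) : Bool :=
  let p1 := if intv1.1 > intv1.2 then (intv1.2, intv1.1) else intv1
  let p2 := if intv2.1 > intv2.2 then (intv2.2, intv2.1) else intv2
  let overlapmin := max p1.1 p2.1
  let overlapmax := min p1.2 p2.2
  decide (overlapmin ≤ overlapmax)

def exclude_invalid (peak_times : List Int) (invalid_areas : List (Int × Int)) : List (Int × Int) :=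
  (PySem.List.pyRange 0 ((peak_times.length : Int) - 1) 1).foldl (fun valid_intervals i =>
    let start_time := PySem.List.pyGetD peak_times i 0
    let end_time := PySem.List.pyGetD peak_times (i + 1) 0
    let interval := (start_time, end_time)
    if invalid_areas.any (fun invalid_area => does_overlap interval invalid_area) then
      valid_intervals
    else valid_intervals ++ [interval]) []

-- ===== PORT B =====
def exclude_invalid_alt (peak_times : List Int) (invalid_areas : List (Int × Int)) : List (Int × Int) :=
  let areas := PySem.List.sorted
      (invalid_areas.map (fun p => if p.1 ≤ p.2 then p else (p.2, p.1))) (fun p => p.1) false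
  let starts := areas.map (fun p => p.1)
  let prefmax := (areas.foldl (fun (st : Option Int × List Int) p =>
      let b : Int := match st.1 with
        | none => p.2
        | some m => if p.2 > m then p.2 else m
      (some b, st.2 ++ [b])) (none, [])).2
  (peak_times.zip peak_times.tail).foldl (fun out se =>
    let lohi := if se.1 ≤ se.2 then se else (se.2, se.1)
    let k := PySem.List.bisectRight starts lohi.2
    if k = 0 ∨ prefmax.getD (k - 1) 0 < lohi.1 then out ++ [se] else out) []

-- ===== PRECONDITION & SPEC =====
def Spec_exclude_invalid (peak_times : List Int) (invalid_areas : List (Int × Int)) (out : List (Int × Int)) : Prop := out = exclude_invalid_alt peak_times invalid_areas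
instance (peak_times : List Int) (invalid_areas : List (Int × Int)) (out : List (Int × Int)) : Decidable (Spec_exclude_invalid peak_times invalid_areas out) := by unfold Spec_exclude_invalid; infer_instance

-- ===== CLAIM (what is proved, stated in full; the proofs are below) =====
def Claim_equal_exclude_invalid : Prop := ∀ (peak_times : List Int) (invalid_areas : List (Int × Int)), Dom_exclude_invalid peak_times invalid_areas → Spec_exclude_invalid peak_times invalid_areas (exclude_invalid peak_times invalid_areas)

-- ===== LEMMAS AND PROOFS =====

def pvBuildPref (l : List (Int × Int)) (best : Option Int) : List Int :=
  match l with
  | [] => []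
  | p :: rest =>
    let b : Int := match best with
      | none => p.2
      | some m => if p.2 > m then p.2 else m
    b :: pvBuildPref rest (some b)

def pvLastBest (l : List (Int × Int)) (best : Option Int) : Option Int :=
  match l with
  | [] => best
  | p :: rest =>
    let b : Int := match best with
      | none => p.2
      | some m => if p.2 > m then p.2 else m
    pvLastBest rest (some b)

theorem pvFoldPref (l : List (Int × Int)) (best : Option Int) (acc : List Int) :
    (l.foldl (fun (st : Option Int × List Int) p =>
      let b : Int := match st.1 with
        | none => p.2
        | some m => if p.2 > m then p.2 else m
      (some b, st.2 ++ [b])) (best, acc)) =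
    (pvLastBest l best, acc ++ pvBuildPref l best) := by
  induction l generalizing best acc with
  | nil => simp [pvLastBest, pvBuildPref]
  | cons p rest ih => simp [pvLastBest, pvBuildPref, List.foldl_cons, ih]

theorem pvDoesOverlap_iff (s e : Int) (q : Int × Int) :
    does_overlap (s, e) q = true ↔
      (min q.1 q.2 ≤ max s e ∧ min s e ≤ max q.1 q.2) := by
  simp only [does_overlap, decide_eq_true_eq]
  split_ifs <;> omega

theorem pvIntervals_eq (pt : List Int) :
    (PySem.List.pyRange 0 ((pt.length : Int) - 1) 1).map
      (fun i => (PySem.List.pyGetD pt i 0, PySem.List.pyGetD pt (i + 1) 0)) =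
    pt.zip pt.tail := by
  apply List.ext_getElem
  · simp [PySem.List.length_pyRange_one]
  · intro k h1 h2
    have hk : k < pt.length - 1 := by
      simp [PySem.List.length_pyRange_one] at h1; omega
    simp only [List.getElem_map, PySem.List.getElem_pyRange_one, List.getElem_zip,
      List.getElem_tail, zero_add]
    have h1' : PySem.List.pyGetD pt ((k : Int)) 0 = pt[k] := by
      rw [PySem.List.pyGetD_natCast]; exact List.getD_eq_getElem _ _ (by omega)
    have h2' : PySem.List.pyGetD pt ((k : Int) + 1) 0 = pt[k+1] := by
      have : ((k : Int) + 1) = ((k + 1 : Nat) : Int) := by push_cast; ring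
      rw [this, PySem.List.pyGetD_natCast]; exact List.getD_eq_getElem _ _ (by omega)
    simp [h1', h2']

theorem pvBuildPref_spec (l : List (Int × Int)) (best : Option Int) (j : Nat)
    (hj : j < l.length) (x : Int) :
    x ≤ (pvBuildPref l best).getD j 0 ↔
      (∃ i, ∃ _ : i < l.length, i ≤ j ∧ x ≤ l[i].2) ∨ (∃ m, best = some m ∧ x ≤ m) := by
  induction l generalizing best j with
  | nil => simp at hj
  | cons p rest ih =>
    match j with
    | 0 =>
      simp only [pvBuildPref, List.getD_cons_zero]
      constructor
      · intro h
        match best with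
        | none => exact Or.inl ⟨0, by simp, by omega, h⟩
        | some m =>
          simp only at h
          split_ifs at h with hc
          · exact Or.inl ⟨0, by simp, by omega, h⟩
          · exact Or.inr ⟨m, rfl, h⟩
      · rintro (⟨i, hi, hij, hx⟩ | ⟨m, hm, hx⟩)
        · interval_cases i
          simp only [List.getElem_cons_zero] at hx
          match best with
          | none => exact hx
          | some m => simp only; split_ifs <;> omega
        · subst hm; simp only; split_ifs <;> omega
    | j + 1 =>
      simp only [pvBuildPref, List.getD_cons_succ]
      rw [ih (some _) j (by simpa using hj) ]
      constructor
      · rintro (⟨i, hi, hij, hx⟩ | ⟨m, hm, hx⟩)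
        · exact Or.inl ⟨i + 1, by simpa using hi, by omega, by simpa using hx⟩
        · simp only [Option.some.injEq] at hm
          subst hm
          match best with
          | none => exact Or.inl ⟨0, by simp, by omega, by simpa using hx⟩
          | some m' =>
            simp only at hx
            split_ifs at hx with hc
            · exact Or.inl ⟨0, by simp, by omega, by simpa using hx⟩
            · exact Or.inr ⟨m', rfl, hx⟩
      · rintro (⟨i, hi, hij, hx⟩ | ⟨m, hm, hx⟩)
        · match i with
          | 0 =>
            refine Or.inr ⟨_, rfl, ?_⟩
            simp only [List.getElem_cons_zero] at hx
            match best with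
            | none => exact hx
            | some m' => simp only; split_ifs <;> omega
          | i + 1 =>
            exact Or.inl ⟨i, by simpa using hi, by omega, by simpa using hx⟩
        · refine Or.inr ⟨_, rfl, ?_⟩
          subst hm
          simp only
          split_ifs <;> omega

theorem pvNorm (q : Int × Int) :
    (if q.1 ≤ q.2 then q else (q.2, q.1)) = (min q.1 q.2, max q.1 q.2) := by
  obtain ⟨a, b⟩ := q
  split_ifs <;> simp [min_def, max_def] <;> omega

theorem pvPred_eq (inv : List (Int × Int)) (s e : Int) :
    (inv.any (fun q => does_overlap (s, e) q) = true) ↔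
    ¬(PySem.List.bisectRight
        ((PySem.List.sorted (inv.map (fun p => if p.1 ≤ p.2 then p else (p.2, p.1)))
          (fun p => p.1) false).map (fun p => p.1)) (max s e) = 0 ∨
      (pvBuildPref (PySem.List.sorted (inv.map (fun p => if p.1 ≤ p.2 then p else (p.2, p.1)))
          (fun p => p.1) false) none).getD
        (PySem.List.bisectRight
          ((PySem.List.sorted (inv.map (fun p => if p.1 ≤ p.2 then p else (p.2, p.1)))
            (fun p => p.1) false).map (fun p => p.1)) (max s e) - 1) 0 < min s e) := by
  set areas := PySem.List.sorted (inv.map (fun p => if p.1 ≤ p.2 then p else (p.2, p.1)))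
      (fun p => p.1) false with hareas
  set starts := areas.map (fun p => p.1) with hstarts
  set k := PySem.List.bisectRight starts (max s e) with hkdef
  have hsorted : starts.Pairwise (· ≤ ·) := by
    rw [hstarts, List.pairwise_map]
    exact PySem.List.sorted_pairwise _ _
  obtain ⟨hkle, hlt, hgt⟩ := PySem.List.bisectRight_spec starts (max s e) hsorted
  have hlen : starts.length = areas.length := by rw [hstarts]; exact List.length_map ..
  have h1 : (inv.any (fun q => does_overlap (s, e) q) = true) ↔
      ∃ i, ∃ _ : i < areas.length, areas[i].1 ≤ max s e ∧ min s e ≤ areas[i].2 := by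
    rw [List.any_eq_true]
    constructor
    · rintro ⟨q, hq, hov⟩
      rw [pvDoesOverlap_iff] at hov
      have hmem : (min q.1 q.2, max q.1 q.2) ∈ areas := by
        rw [hareas, PySem.List.mem_sorted _ _ _ _, ← pvNorm]
        exact List.mem_map_of_mem hq
      obtain ⟨i, hi, hEq⟩ := List.mem_iff_getElem.mp hmem
      exact ⟨i, hi, by rw [hEq]; exact hov.1, by rw [hEq]; exact hov.2⟩
    · rintro ⟨i, hi, ha, hb⟩
      have hmem : areas[i] ∈ inv.map (fun p => if p.1 ≤ p.2 then p else (p.2, p.1)) :=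
        (PySem.List.mem_sorted _ _ _ _).mp (List.getElem_mem hi)
      obtain ⟨q, hq, hEq⟩ := List.mem_map.mp hmem
      rw [pvNorm] at hEq
      refine ⟨q, hq, (pvDoesOverlap_iff s e q).mpr ?_⟩
      rw [← hEq] at ha hb
      exact ⟨ha, hb⟩
  rw [h1]
  constructor
  · rintro ⟨i, hi, ha, hb⟩
    have hstarti : starts[i]'(by omega) = areas[i].1 := List.getElem_map ..
    have hik : i < k := by
      by_contra hcon
      have := hgt i (by omega) (by omega)
      rw [hstarti] at this
      omega
    push_neg
    refine ⟨by omega, ?_⟩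
    rw [pvBuildPref_spec areas none (k - 1) (by omega) (min s e)]
    exact Or.inl ⟨i, hi, by omega, hb⟩
  · intro h
    push_neg at h
    obtain ⟨hk0, hge⟩ := h
    rw [pvBuildPref_spec areas none (k - 1) (by omega) (min s e)] at hge
    rcases hge with ⟨i, hi, hij, hx⟩ | ⟨m, hm, _⟩
    · refine ⟨i, hi, ?_, hx⟩
      have := hlt i (by omega) (by omega)
      have hstarti : starts[i]'(by omega) = areas[i].1 := List.getElem_map ..
      omega
    · simp at hm

-- ===== VERDICT (by name: the statement is the Claim_ definition above) =====
theorem exclude_invalid_spec : Claim_equal_exclude_invalid := by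
  intro pt inv _
  unfold Spec_exclude_invalid exclude_invalid exclude_invalid_alt
  simp only [pvFoldPref, List.nil_append]
  rw [← pvIntervals_eq pt, List.foldl_map]
  congr 1
  funext acc i
  rw [pvNorm]
  by_cases h : (inv.any fun invalid_area =>
      does_overlap (PySem.List.pyGetD pt i 0, PySem.List.pyGetD pt (i + 1) 0) invalid_area) = true
  · rw [if_pos h, if_neg ((pvPred_eq inv _ _).mp h)]
  · rw [if_neg h, if_pos (not_not.mp (fun hc => h ((pvPred_eq inv _ _).mpr hc)))]
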